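-- pv_equiv track=rewrite | github.com/joshchwang/ICS4U-Classwork | algorithms/8. count 8/practice_count_8.py | count8
-- ===== SOURCE A (Python) =====
-- def count8(num, found=False):
--     if num == 0:
--         return num
--
--     if num % 10 == 8 and not found:
--         return 1 + count8(num // 10, True)
--     elif num % 10 == 8 and found:
--         return 2 + count8(num // 10, True)
--     return 0 + count8(num // 10)
-- ===== SOURCE B (Python) =====
-- def count8(num, found=False):
--     # Two staged passes: extract the digit list (least-significant first),
--     # then count 8s plus one extra for every adjacent 8-8 pair.
--     digits = []
--     n = num
--     while n != 0:
--         digits.append(n % 10)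
--         n //= 10
--     eights = digits.count(8)
--     doubles = sum(1 for x, y in zip(digits, digits[1:]) if x == 8 and y == 8)
--     if found and digits[:1] == [8]:
--         doubles += 1
--     return eights + doubles
-- ===== Notes on version B (the rewrite author's own statement) =====
-- stated objective: alternative
-- what changed: Replaced the flag-threading recursion by two staged passes: first build the digit list, then compute the count as (number of 8 digits) + (number of adjacent 8-8 pairs), with one extra if found and the last digit is 8.
import Mathlib
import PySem

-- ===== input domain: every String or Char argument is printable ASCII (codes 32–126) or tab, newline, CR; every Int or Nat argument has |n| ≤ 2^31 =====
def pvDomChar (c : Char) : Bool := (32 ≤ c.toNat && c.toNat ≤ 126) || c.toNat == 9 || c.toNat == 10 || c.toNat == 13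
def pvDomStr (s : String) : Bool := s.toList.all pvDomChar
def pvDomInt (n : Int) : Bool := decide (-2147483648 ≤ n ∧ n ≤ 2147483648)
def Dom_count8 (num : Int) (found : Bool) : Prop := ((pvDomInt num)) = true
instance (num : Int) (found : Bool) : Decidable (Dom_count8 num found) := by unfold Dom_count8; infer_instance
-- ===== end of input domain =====

-- B replaces A's flag-threading recursion by two staged passes: build the digit list,
-- then count 8s plus adjacent 8-8 pairs (alternative decomposition, same cost).


-- ===== PORT A =====
-- A's recursion only returns for num ≥ 0 (Pre_); on that domain Python's % and // on
-- nonnegative ints coincide with Nat.% and Nat./, so the recursion is carried on num.toNat.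
def count8Go (n : Nat) (found : Bool) : Int :=
  if n = 0 then 0
  else if n % 10 = 8 ∧ found = false then 1 + count8Go (n / 10) true
  else if n % 10 = 8 ∧ found = true then 2 + count8Go (n / 10) true
  else 0 + count8Go (n / 10) false
decreasing_by all_goals exact Nat.div_lt_self (Nat.pos_of_ne_zero (by assumption)) (by norm_num)

def count8 (num : Int) (found : Bool) : Int := count8Go num.toNat found

-- ===== PORT B =====
-- the digit-extraction while loop (least-significant digit first)
def c8Digits (n : Nat) : List Nat :=
  if n = 0 then [] else n % 10 :: c8Digits (n / 10)
decreasing_by exact Nat.div_lt_self (Nat.pos_of_ne_zero (by assumption)) (by norm_num)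

-- sum(1 for x, y in zip(digits, digits[1:]) if x == 8 and y == 8)
def c8Pairs (l : List Nat) : Int :=
  ((l.zip l.tail).filter (fun p => p.1 == 8 && p.2 == 8)).length

def count8_alt (num : Int) (found : Bool) : Int :=
  let digits := c8Digits num.toNat
  let eights : Int := digits.count 8
  let doubles := c8Pairs digits
  let doubles := if found && digits.take 1 == [8] then doubles + 1 else doubles
  eights + doubles

-- ===== PRECONDITION & SPEC =====
-- Pre_ excludes negative num, on which A's recursion never terminates (RecursionError).
def Pre_count8 (num : Int) (found : Bool) : Prop := 0 ≤ num
instance (num : Int) (found : Bool) : Decidable (Pre_count8 num found) := by unfold Pre_count8; infer_instance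
def pvWitness_count8 : Int × Bool := (8818, false)

def Spec_count8 (num : Int) (found : Bool) (out : Int) : Prop := out = count8_alt num found
instance (num : Int) (found : Bool) (out : Int) : Decidable (Spec_count8 num found out) := by unfold Spec_count8; infer_instance

-- ===== CLAIM (what is proved, stated in full; the proofs are below) =====
def Claim_equal_count8 : Prop := ∀ (num : Int) (found : Bool), Dom_count8 num found → Pre_count8 num found → Spec_count8 num found (count8 num found)

-- ===== LEMMAS AND PROOFS =====
theorem c8Pairs_cons (d : Nat) (l : List Nat) :
    c8Pairs (d :: l) = (if d = 8 ∧ l.take 1 = [8] then 1 else 0) + c8Pairs l := by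
  cases l with
  | nil => simp [c8Pairs]
  | cons x xs =>
    simp only [c8Pairs, List.tail_cons, List.zip_cons_cons, List.filter_cons, List.take]
    by_cases hd : d = 8 <;> by_cases hx : x = 8 <;>
      simp [hd, hx] <;> omega

theorem count8Go_eq (n : Nat) : ∀ (f : Bool),
    count8Go n f = ((c8Digits n).count 8 : Int) + c8Pairs (c8Digits n)
      + (if f = true ∧ (c8Digits n).take 1 = [8] then 1 else 0) := by
  induction n using Nat.strong_induction_on with
  | _ n ih =>
    intro f
    by_cases h0 : n = 0
    · simp [h0, count8Go, c8Digits, c8Pairs]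
    · have hlt : n / 10 < n := Nat.div_lt_self (Nat.pos_of_ne_zero h0) (by norm_num)
      have hdig : c8Digits n = n % 10 :: c8Digits (n / 10) := by
        rw [c8Digits]; simp [h0]
      by_cases h8 : n % 10 = 8
      · cases f <;>
          · rw [count8Go]
            simp only [h0, if_false, h8, hdig]
            rw [ih _ hlt true, c8Pairs_cons]
            simp [h8]
            split_ifs <;> ring
      · rw [count8Go]
        simp only [h0, if_false, hdig]
        rw [ih _ hlt false, c8Pairs_cons]
        simp [h8]

-- ===== VERDICT =====
theorem count8_spec : Claim_equal_count8 := by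
  intro num found _ _
  unfold Spec_count8 count8 count8_alt
  rw [count8Go_eq]
  by_cases hf : found = true <;> by_cases ht : (c8Digits num.toNat).take 1 = [8] <;>
    simp [hf, ht] <;> ring
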